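-- pv_equiv track=rewrite | github.com/Nathpett/cryptography | main.py | encode_ragbaby
-- ===== SOURCE A (Python) =====
-- def encode_ragbaby(text, key, enc = 1):
--     #Similar to ceasar.  key is added to the start of the alphabet, and all non-unique letters are removed.  if "key" is our key, then our 26 char key will be:
--     #"KEYABCDFGHIJLMNOPQRSTUVWXZ"
--     #each letter is then replaced with a letter in that key, offset by its position in its own word
--
--     #clean key
--     key = list(key)
--     _list = []
--     for c in key:
--         if c not in _list:
--             _list += c
--     key = "".join(_list).upper()
--
--     #set alp
--     alp = "ABCDEFGHIJKLMNOPQRSTUVWXYZ"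
--     alp = "".join([c for c in alp if c not in key])
--     alp = key + alp
--
--     r = ""
--     j = 1
--     for c in text:
--         if c.upper() in alp:
--             i = (alp.index(c.upper()) + (j * enc)) % 26
--             if c.isupper():
--                 r += alp[i]
--             else:
--                 r += alp[i].lower()
--             j += 1
--         else:
--             r += c
--             j = 1
--
--     return r
-- ===== SOURCE B (Python) =====
-- def encode_ragbaby(text, key, enc=1):
--     # build the (possibly 27+ char) alphabet exactly as the original: case-sensitive
--     # ordered dedup of the key, uppercased, then the unused A-Z letters appended
--     keyd = "".join(dict.fromkeys(key)).upper()
--     alp = keyd + "".join(c for c in "ABCDEFGHIJKLMNOPQRSTUVWXYZ" if c not in keyd)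
--     # first-occurrence index of each letter, built once (replaces alp.index scans)
--     pos = {}
--     for i, ch in enumerate(alp):
--         pos.setdefault(ch, i)
--     out = []
--     n = len(text)
--     k = 0
--     while k < n:
--         if text[k].upper() in pos:
--             start = k
--             while k < n and text[k].upper() in pos:
--                 k += 1
--             for j, c in enumerate(text[start:k], 1):
--                 o = alp[(pos[c.upper()] + j * enc) % 26]
--                 out.append(o if c.isupper() else o.lower())
--         else:
--             out.append(text[k])
--             k += 1
--     return "".join(out)
-- ===== Notes on version B (the rewrite author's own statement) =====
-- stated objective: alternative
-- what changed: B splits the text into maximal cipher-letter / non-letter runs and encodes each letter run via a first-occurrence index dictionary built once, instead of A's single pass with a resetting counter and a linear alp.index scan per letter.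
import Mathlib
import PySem

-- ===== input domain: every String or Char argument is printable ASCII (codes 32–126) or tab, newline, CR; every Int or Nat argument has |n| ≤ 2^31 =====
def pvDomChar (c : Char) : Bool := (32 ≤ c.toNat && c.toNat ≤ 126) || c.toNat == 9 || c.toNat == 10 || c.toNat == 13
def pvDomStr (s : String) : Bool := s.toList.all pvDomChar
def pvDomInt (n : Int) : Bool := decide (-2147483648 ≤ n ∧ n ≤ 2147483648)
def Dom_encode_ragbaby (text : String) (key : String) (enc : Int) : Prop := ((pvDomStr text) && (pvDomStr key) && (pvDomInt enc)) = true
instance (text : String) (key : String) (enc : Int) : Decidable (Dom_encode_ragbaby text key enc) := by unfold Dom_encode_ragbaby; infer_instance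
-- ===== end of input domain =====

-- B replaces A's single pass (resetting counter + an alp.index scan per letter) by run-splitting
-- of the text into letter/non-letter runs plus a first-occurrence index dict built once;
-- objective: alternative decomposition (same asymptotic cost on the 26-letter alphabet).


-- ===== PORT A =====
-- A's main loop: state (r, j); c.upper() in alp is char membership (c.upper() is one char on
-- this domain); alp.index is index? (membership guarantees some; .getD 0 is unreachable there),
-- alp[i] is pyGet? (0 ≤ i < 26 ≤ len alp, so the .getD 'A' default is unreachable too)
def encodeA_go (alp : List Char) (enc : Int) : List Char → List Char → Int → List Char
  | [], r, _ => r
  | c :: cs, r, j =>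
    if PySem.Chars.upperChar c ∈ alp then
      let i := PySem.Int.mod (((PySem.List.index? alp (PySem.Chars.upperChar c)).getD 0 : Int) + j * enc) 26
      if PySem.Chars.isupper c then
        encodeA_go alp enc cs (r ++ [(PySem.List.pyGet? alp i).getD 'A']) (j + 1)
      else
        encodeA_go alp enc cs (r ++ [PySem.Chars.lowerChar ((PySem.List.pyGet? alp i).getD 'A')]) (j + 1)
    else
      encodeA_go alp enc cs (r ++ [c]) 1

def encode_ragbaby (text : String) (key : String) (enc : Int) : String :=
  -- clean key: case-sensitive ordered dedup loop, then .upper()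
  let lst := key.toList.foldl (fun acc c => if c ∈ acc then acc else acc ++ [c]) ([] : List Char)
  let keyU := PySem.Chars.upper lst
  -- set alp
  let alp := keyU ++ ("ABCDEFGHIJKLMNOPQRSTUVWXYZ".toList.filter (fun c => ¬ c ∈ keyU))
  String.ofList (encodeA_go alp enc text.toList [] 1)

-- ===== PORT B =====
-- encode one letter of a run, j = 1-based position in the run
def altEncChar (alp : List Char) (pos : PySem.Dict Char Int) (enc : Int) (j : Int) (c : Char) : Char :=
  let o := (PySem.List.pyGet? alp (PySem.Int.mod (pos.getD (PySem.Chars.upperChar c) 0 + j * enc) 26)).getD 'A'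
  if PySem.Chars.isupper c then o else PySem.Chars.lowerChar o

-- B's outer while-loop: split off a maximal letter run (inner while = takeWhile/dropWhile),
-- or copy one non-letter character
def altGo (alp : List Char) (pos : PySem.Dict Char Int) (enc : Int) : List Char → List Char
  | [] => []
  | c :: cs =>
    if pos.contains (PySem.Chars.upperChar c) then
      let run := c :: cs.takeWhile (fun x => pos.contains (PySem.Chars.upperChar x))
      let rest := cs.dropWhile (fun x => pos.contains (PySem.Chars.upperChar x))
      ((PySem.List.enumerate run 1).map (fun p => altEncChar alp pos enc p.1 p.2)) ++ altGo alp pos enc rest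
    else
      c :: altGo alp pos enc cs
  termination_by cs => cs.length
  decreasing_by
  · exact Nat.lt_succ_of_le (List.length_dropWhile_le _ _)
  · exact Nat.lt_succ_of_le (Nat.le_refl _)

def encode_ragbaby_alt (text : String) (key : String) (enc : Int) : String :=
  let keyd := PySem.Chars.upper (PySem.List.dedup key.toList)
  let alp := keyd ++ ("ABCDEFGHIJKLMNOPQRSTUVWXYZ".toList.filter (fun c => ¬ c ∈ keyd))
  let pos := (PySem.List.enumerate alp 0).foldl (fun d p => d.setdefault p.2 p.1) (PySem.Dict.empty)
  String.ofList (altGo alp pos enc text.toList)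

-- ===== PRECONDITION & SPEC =====
def Spec_encode_ragbaby (text : String) (key : String) (enc : Int) (out : String) : Prop := out = encode_ragbaby_alt text key enc
instance (text : String) (key : String) (enc : Int) (out : String) : Decidable (Spec_encode_ragbaby text key enc out) := by unfold Spec_encode_ragbaby; infer_instance

-- ===== CLAIM (what is proved, stated in full; the proofs are below) =====
def Claim_equal_encode_ragbaby : Prop := ∀ (text : String) (key : String) (enc : Int), Dom_encode_ragbaby text key enc → Spec_encode_ragbaby text key enc (encode_ragbaby text key enc)

-- ===== LEMMAS AND PROOFS =====

-- A's dedup loop is dict.fromkeys (PySem.List.dedup)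
lemma dedup_loop_eq (l : List Char) :
    l.foldl (fun acc c => if c ∈ acc then acc else acc ++ [c]) ([] : List Char) = PySem.List.dedup l := by
  have hf : (fun (acc : List Char) (c : Char) => if c ∈ acc then acc else acc ++ [c]) = PySem.Set.add := by
    funext acc c
    simp [PySem.Set.add]
  simp [PySem.List.dedup, PySem.Set.ofList, PySem.Set.empty, hf]

-- the setdefault fold keeps the FIRST index of each key
lemma pos_fold_get? (l : List Char) : ∀ (n : Int) (d : PySem.Dict Char Int) (c : Char),
    ((PySem.List.enumerate l n).foldl (fun d p => d.setdefault p.2 p.1) d).get? c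
      = (d.get? c).or ((PySem.List.index? l c).map (fun k => n + (k : Int))) := by
  induction l with
  | nil => intro n d c; simp [PySem.List.enumerate, PySem.List.index?_eq_idxOf?, List.idxOf?]
  | cons x xs ih =>
    intro n d c
    rw [PySem.List.enumerate_cons]
    simp only [List.foldl_cons]
    rw [ih]
    by_cases hc : c = x
    · subst hc
      rw [PySem.Dict.get?_setdefault_self, PySem.List.index?_cons_self]
      cases d.get? c <;> simp
    · rw [PySem.Dict.get?_setdefault_of_ne _ _ hc, PySem.List.index?_cons_of_ne _ (Ne.symm hc)]
      cases h : d.get? c <;> cases h2 : PySem.List.index? xs c <;> simp <;> push_cast <;> ring_nf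

lemma pos_get? (alp : List Char) (c : Char) :
    (((PySem.List.enumerate alp 0).foldl (fun d p => d.setdefault p.2 p.1) (PySem.Dict.empty)).get? c)
      = (PySem.List.index? alp c).map (fun k => (k : Int)) := by
  rw [pos_fold_get?]
  simp [PySem.Dict.get?_empty]

-- pull the accumulator out of A's loop
lemma encodeA_go_acc (alp : List Char) (enc : Int) : ∀ (cs : List Char) (r : List Char) (j : Int),
    encodeA_go alp enc cs r j = r ++ encodeA_go alp enc cs [] j := by
  intro cs
  induction cs with
  | nil => intro r j; simp [encodeA_go]
  | cons c cs ih =>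
    intro r j
    simp only [encodeA_go]
    split_ifs with h1 h2 <;> rw [ih, ih (([] : List Char) ++ _)] <;> simp

-- one letter encodes the same on both sides (pos is B's dict over the SAME alp)
lemma encChar_eq (alp : List Char) (pos : PySem.Dict Char Int) (enc : Int)
    (hget : ∀ c, pos.get? c = (PySem.List.index? alp c).map (fun k => (k : Int)))
    (c : Char) (j : Int) (hc : PySem.Chars.upperChar c ∈ alp) :
    (if PySem.Chars.isupper c then
        (PySem.List.pyGet? alp (PySem.Int.mod (((PySem.List.index? alp (PySem.Chars.upperChar c)).getD 0 : Int) + j * enc) 26)).getD 'A'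
      else
        PySem.Chars.lowerChar ((PySem.List.pyGet? alp (PySem.Int.mod (((PySem.List.index? alp (PySem.Chars.upperChar c)).getD 0 : Int) + j * enc) 26)).getD 'A'))
      = altEncChar alp pos enc j c := by
  obtain ⟨k, hk⟩ := Option.isSome_iff_exists.mp ((PySem.List.index?_isSome_iff alp _).mpr hc)
  unfold altEncChar
  rw [PySem.Dict.getD, hget, hk]
  simp

-- A's loop over an all-letter run produces B's enumerate-map, counter threaded through
lemma encodeA_go_run (alp : List Char) (pos : PySem.Dict Char Int) (enc : Int)
    (hget : ∀ c, pos.get? c = (PySem.List.index? alp c).map (fun k => (k : Int))) :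
    ∀ (run : List Char), (∀ x ∈ run, PySem.Chars.upperChar x ∈ alp) → ∀ (rest : List Char) (j : Int),
    encodeA_go alp enc (run ++ rest) [] j
      = ((PySem.List.enumerate run j).map (fun p => altEncChar alp pos enc p.1 p.2))
          ++ encodeA_go alp enc rest [] (j + run.length) := by
  intro run
  induction run with
  | nil => intro _ rest j; simp [PySem.List.enumerate]
  | cons c cs ih =>
    intro hall rest j
    have hc : PySem.Chars.upperChar c ∈ alp := hall c (by simp)
    have harith : j + 1 + (cs.length : Int) = j + ((c :: cs).length : Int) := by
      simp; ring
    rw [PySem.List.enumerate_cons, List.map_cons]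
    simp only [List.cons_append, encodeA_go, if_pos hc]
    have hmap := encChar_eq alp pos enc hget c j hc
    split_ifs with hu <;>
      [rw [if_pos hu] at hmap; rw [if_neg hu] at hmap] <;>
      rw [encodeA_go_acc, ih (fun x hx => hall x (by simp [hx])) rest (j + 1), harith, hmap] <;>
      simp

-- a non-letter resets j: the incoming counter is irrelevant when the head is not a letter
lemma encodeA_go_reset (alp : List Char) (enc : Int) (cs : List Char)
    (h : cs = [] ∨ ∃ c cs', cs = c :: cs' ∧ ¬ PySem.Chars.upperChar c ∈ alp) (j j' : Int) :
    encodeA_go alp enc cs [] j = encodeA_go alp enc cs [] j' := by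
  rcases h with h | ⟨c, cs', rfl, hc⟩
  · subst h; rfl
  · simp only [encodeA_go, if_neg hc]

-- main loop equivalence, strong induction on length
lemma go_eq (alp : List Char) (pos : PySem.Dict Char Int) (enc : Int)
    (hget : ∀ c, pos.get? c = (PySem.List.index? alp c).map (fun k => (k : Int))) :
    ∀ (n : Nat) (cs : List Char), cs.length ≤ n →
    encodeA_go alp enc cs [] 1 = altGo alp pos enc cs := by
  have hcont : ∀ c, pos.contains c = decide (c ∈ alp) := by
    intro c
    rw [PySem.Dict.contains_eq_isSome_get?, hget c]
    by_cases h : c ∈ alp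
    · obtain ⟨k, hk⟩ := Option.isSome_iff_exists.mp ((PySem.List.index?_isSome_iff alp c).mpr h)
      rw [hk]
      simp [h]
    · rw [(PySem.List.index?_eq_none_iff alp c).mpr h]
      simp [h]
  intro n
  induction n with
  | zero =>
    intro cs hcs
    rw [List.length_eq_zero_iff.mp (Nat.le_zero.mp hcs)]
    simp [encodeA_go, altGo]
  | succ n ih =>
    intro cs hcs
    match cs with
    | [] => simp [encodeA_go, altGo]
    | c :: cs =>
      by_cases hc : PySem.Chars.upperChar c ∈ alp
      · -- letter run
        have hp : pos.contains (PySem.Chars.upperChar c) = true := by simp [hcont, hc]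
        rw [altGo]
        simp only [hp, if_pos]
        set p := fun x => pos.contains (PySem.Chars.upperChar x) with hpdef
        have hsplit : c :: cs = (c :: cs.takeWhile p) ++ cs.dropWhile p := by
          simp [List.takeWhile_append_dropWhile]
        have hall : ∀ x ∈ c :: cs.takeWhile p, PySem.Chars.upperChar x ∈ alp := by
          intro x hx
          rcases List.mem_cons.mp hx with rfl | hx
          · exact hc
          · have := List.mem_takeWhile_imp hx
            simpa [hpdef, hcont] using this
        rw [hsplit, encodeA_go_run alp pos enc hget _ hall _ 1]
        congr 1
        have hrest : cs.dropWhile p = [] ∨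
            ∃ d ds, cs.dropWhile p = d :: ds ∧ ¬ PySem.Chars.upperChar d ∈ alp := by
          cases hdw : cs.dropWhile p with
          | nil => exact Or.inl rfl
          | cons d ds =>
            refine Or.inr ⟨d, ds, rfl, ?_⟩
            have := List.head_dropWhile_not p (l := cs) (by simp [hdw])
            simp only [hdw, List.head_cons] at this
            simpa [hpdef, hcont] using this
        rw [encodeA_go_reset alp enc _ hrest _ 1]
        exact ih _ (Nat.le_trans (List.length_dropWhile_le p cs) (Nat.le_of_succ_le_succ hcs))
      · -- non-letter: copy and recurse
        have hp : pos.contains (PySem.Chars.upperChar c) = false := by simp [hcont, hc]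
        rw [altGo]
        simp only [hp, Bool.false_eq_true, if_neg, not_false_iff]
        simp only [encodeA_go, if_neg hc]
        rw [encodeA_go_acc]
        simp only [List.nil_append, List.singleton_append]
        rw [ih cs (Nat.le_of_succ_le_succ hcs)]

-- ===== VERDICT (by name: the statement is the Claim_ definition above) =====
theorem encode_ragbaby_spec : Claim_equal_encode_ragbaby := by
  intro text key enc _
  unfold Spec_encode_ragbaby encode_ragbaby encode_ragbaby_alt
  rw [dedup_loop_eq]
  exact congrArg String.ofList (go_eq _ _ enc (fun c => pos_get? _ c) text.toList.length text.toList (Nat.le_refl _))
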